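-- pv_equiv track=rewrite | github.com/ashirwadsangwan/HackerRankProblems | 30DaysOfCode/Day20.py | countSwaps
-- ===== SOURCE A (Python) =====
-- def countSwaps(a):
--
--     n = len(a)
--     swaps = 0
--     for i in range(n):
--         for j in range(n-1):
--             if a[j] > a[j+1]:
--                 temp = a[j+1]
--                 a[j+1] = a[j]
--                 a[j] = temp
--                 swaps += 1
--     return swaps
-- ===== SOURCE B (Python) =====
-- def countSwaps(a):
--     # Merge-sort inversion counting: bubble-sort's swap total equals the
--     # number of inversions, counted here in O(n log n). (Does not mutate a.)
--     def msort(xs):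
--         n = len(xs)
--         if n < 2:
--             return xs, 0
--         left, inv_l = msort(xs[:n // 2])
--         right, inv_r = msort(xs[n // 2:])
--         merged = []
--         inv = inv_l + inv_r
--         i = j = 0
--         while i < len(left) and j < len(right):
--             if left[i] <= right[j]:
--                 merged.append(left[i])
--                 i += 1
--             else:
--                 merged.append(right[j])
--                 j += 1
--                 inv += len(left) - i
--         merged.extend(left[i:])
--         merged.extend(right[j:])
--         return merged, inv
--     return msort(a)[1]
-- ===== Notes on version B (the rewrite author's own statement) =====
-- stated objective: faster
-- what changed: Replaces the n full bubble-sort passes with swap counting by a merge-sort that counts inversions (bubble sort's total swap count equals the number of inversions); B also avoids mutating the caller's list.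
import Mathlib
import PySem

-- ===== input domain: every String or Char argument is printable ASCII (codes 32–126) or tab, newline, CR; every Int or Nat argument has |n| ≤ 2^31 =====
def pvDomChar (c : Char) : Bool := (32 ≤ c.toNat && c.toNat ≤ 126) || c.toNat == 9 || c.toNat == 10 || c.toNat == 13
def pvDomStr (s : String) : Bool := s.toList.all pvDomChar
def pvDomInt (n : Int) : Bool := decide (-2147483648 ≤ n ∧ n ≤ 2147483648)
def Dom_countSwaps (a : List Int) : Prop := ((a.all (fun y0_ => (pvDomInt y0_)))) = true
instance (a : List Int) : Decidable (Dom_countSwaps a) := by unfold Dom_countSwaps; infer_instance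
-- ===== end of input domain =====

-- B replaces A's n full bubble passes by merge-sort inversion counting (the swap total of
-- bubble sort equals the inversion count). Equivalence is about the RETURN value only:
-- Python A sorts the caller's list in place, B does not mutate it.

-- ===== PORT A =====
-- one inner-loop body: compare a[j], a[j+1], swap (via temp) and count; indices j, j+1 are
-- always in range (j ∈ range(n-1)), so the total pyGetD/pySetD forms are exact here
def pvInnerStep (st : List Int × Int) (j : Int) : List Int × Int :=
  if PySem.List.pyGetD st.1 j 0 > PySem.List.pyGetD st.1 (j+1) 0 then
    let temp := PySem.List.pyGetD st.1 (j+1) 0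
    let a1 := PySem.List.pySetD st.1 (j+1) (PySem.List.pyGetD st.1 j 0)
    let a2 := PySem.List.pySetD a1 j temp
    (a2, st.2 + 1)
  else st

def countSwaps (a : List Int) : Int :=
  let n := PySem.List.len a
  (((PySem.List.pyRange 0 n 1).foldl
      (fun st _ => (PySem.List.pyRange 0 (n-1) 1).foldl pvInnerStep st) (a, 0)).2)

-- ===== PORT B =====
-- the while-loop of Source B as the obvious structural recursion on the two remaining halves;
-- 'inv += len(left) - i' is the length of the remaining left part
def pvMergeLoop : List Int → List Int → List Int × Int
  | [], r => (r, 0)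
  | l, [] => (l, 0)
  | x :: l, y :: r =>
    if x ≤ y then
      let p := pvMergeLoop l (y :: r)
      (x :: p.1, p.2)
    else
      let p := pvMergeLoop (x :: l) r
      (y :: p.1, p.2 + (x :: l).length)

-- xs[:n//2] and xs[n//2:] ported as take/drop (exact for these nonnegative bounds)
def pvMsort (xs : List Int) : List Int × Int :=
  if xs.length < 2 then (xs, 0)
  else
    let L := pvMsort (xs.take (xs.length / 2))
    let R := pvMsort (xs.drop (xs.length / 2))
    let M := pvMergeLoop L.1 R.1
    (M.1, L.2 + R.2 + M.2)
termination_by xs.length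
decreasing_by
  · simp only [List.length_take]; omega
  · simp only [List.length_drop]; omega

def countSwaps_alt (a : List Int) : Int := (pvMsort a).2

-- ===== PRECONDITION & SPEC =====
def Spec_countSwaps (a : List Int) (out : Int) : Prop := out = countSwaps_alt a
instance (a : List Int) (out : Int) : Decidable (Spec_countSwaps a out) := by unfold Spec_countSwaps; infer_instance

-- ===== CLAIM (what is proved, stated in full; the proofs are below) =====
def Claim_equal_countSwaps : Prop := ∀ (a : List Int), Dom_countSwaps a → Spec_countSwaps a (countSwaps a)

-- ===== LEMMAS AND PROOFS =====

def pvOnePass : List Int → List Int × Nat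
  | [] => ([], 0)
  | [x] => ([x], 0)
  | x :: y :: t =>
    if y < x then
      let p := pvOnePass (x :: t)
      (y :: p.1, p.2 + 1)
    else
      let p := pvOnePass (y :: t)
      (x :: p.1, p.2)
termination_by l => l.length

lemma pvInnerStep_cons (c : Int) (b : List Int) (s : Int) (j : Int) (hj : 0 ≤ j) :
    pvInnerStep (c :: b, s) (j + 1) =
      ((c :: (pvInnerStep (b, s) j).1), (pvInnerStep (b, s) j).2) := by
  have h2 : (j+1).toNat = j.toNat + 1 := by omega
  have h3 : (j+1+1).toNat = (j+1).toNat + 1 := by omega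
  simp only [pvInnerStep,
    PySem.List.pyGetD_of_nonneg _ _ (by omega : (0:Int) ≤ j+1),
    PySem.List.pyGetD_of_nonneg _ _ (by omega : (0:Int) ≤ j+1+1),
    PySem.List.pyGetD_of_nonneg _ _ hj,
    PySem.List.pySetD_of_nonneg _ _ (by omega : (0:Int) ≤ j+1+1),
    PySem.List.pySetD_of_nonneg _ _ (by omega : (0:Int) ≤ j+1),
    PySem.List.pySetD_of_nonneg _ _ hj, h2, h3]
  simp only [List.getD_cons_succ, List.set_cons_succ]
  split <;> rfl


lemma pvStep0 (x y : Int) (t : List Int) (s : Int) :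
    pvInnerStep (x :: y :: t, s) 0 =
      if y < x then (y :: x :: t, s + 1) else (x :: y :: t, s) := by
  by_cases h : y < x <;>
    simp [pvInnerStep, PySem.List.pyGetD_of_nonneg _ _ (by omega : (0:Int) ≤ 0),
      PySem.List.pyGetD_of_nonneg _ _ (by omega : (0:Int) ≤ 1),
      PySem.List.pySetD_of_nonneg _ _ (by omega : (0:Int) ≤ 0),
      PySem.List.pySetD_of_nonneg _ _ (by omega : (0:Int) ≤ 1), h]

def pvIdx (k : Nat) : List Int := (List.range k).map Int.ofNat

lemma pvIdx_succ (n : Nat) : pvIdx (n + 1) = 0 :: (pvIdx n).map (· + 1) := by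
  simp [pvIdx, List.range_succ_eq_map, List.map_map, Function.comp_def]

lemma pvIdx_nonneg {j : Int} {n : Nat} (h : j ∈ pvIdx n) : 0 ≤ j := by
  simp only [pvIdx, List.mem_map] at h
  obtain ⟨i, _, rfl⟩ := h
  exact Int.natCast_nonneg i

lemma pvFoldl_inner_map_succ (rng : List Int) : ∀ (c : Int) (b : List Int) (s : Int),
    (∀ j ∈ rng, 0 ≤ j) →
    List.foldl pvInnerStep (c :: b, s) (rng.map (· + 1)) =
      ((c :: (List.foldl pvInnerStep (b, s) rng).1),
        (List.foldl pvInnerStep (b, s) rng).2) := by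
  induction rng with
  | nil => intro c b s _; simp
  | cons j rng ih =>
    intro c b s h
    simp only [List.map_cons, List.foldl_cons]
    rw [pvInnerStep_cons c b s j (h j (by simp))]
    exact ih c _ _ (fun x hx => h x (by simp [hx]))

lemma pvRange_cast (k : Nat) : PySem.List.pyRange 0 (k : Int) 1 = pvIdx k := by
  rw [PySem.List.pyRange_one]
  simp [pvIdx]

lemma pvPass_eq (a : List Int) : ∀ (s : Int),
    List.foldl pvInnerStep (a, s) (pvIdx (a.length - 1)) =
      ((pvOnePass a).1, s + ((pvOnePass a).2 : Int)) := by
  induction a using pvOnePass.induct with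
  | case1 => intro s; simp [pvOnePass, pvIdx]
  | case2 x => intro s; simp [pvOnePass, pvIdx]
  | case3 x y t hlt ih =>
    intro s
    rw [show (x :: y :: t).length - 1 = t.length + 1 from by simp, pvIdx_succ,
        List.foldl_cons, pvStep0, if_pos hlt,
        pvFoldl_inner_map_succ _ y (x :: t) (s + 1) (fun j hj => pvIdx_nonneg hj)]
    have h := ih (s + 1)
    rw [show (x :: t).length - 1 = t.length from by simp] at h
    rw [h]
    simp only [pvOnePass, if_pos hlt]
    refine Prod.ext rfl ?_
    push_cast
    ring
  | case4 x y t hge ih =>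
    intro s
    rw [show (x :: y :: t).length - 1 = t.length + 1 from by simp, pvIdx_succ,
        List.foldl_cons, pvStep0, if_neg hge,
        pvFoldl_inner_map_succ _ x (y :: t) s (fun j hj => pvIdx_nonneg hj)]
    have h := ih s
    rw [show (y :: t).length - 1 = t.length from by simp] at h
    rw [h]
    simp only [pvOnePass, if_neg hge]
def pvPasses : Nat → List Int → List Int × Nat
  | 0, l => (l, 0)
  | k + 1, l =>
    let p := pvOnePass l
    let q := pvPasses k p.1
    (q.1, p.2 + q.2)

lemma pvOnePass_perm (l : List Int) : (pvOnePass l).1.Perm l := by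
  induction l using pvOnePass.induct with
  | case1 => simp [pvOnePass]
  | case2 x => simp [pvOnePass]
  | case3 x y t hlt ih =>
    simp only [pvOnePass, if_pos hlt]
    exact (ih.cons y).trans (List.Perm.swap x y t)
  | case4 x y t hge ih =>
    simp only [pvOnePass, if_neg hge]
    exact ih.cons x

lemma pvPasses_perm (k : Nat) : ∀ (l : List Int), (pvPasses k l).1.Perm l := by
  induction k with
  | zero => intro l; simp [pvPasses]
  | succ k ih =>
    intro l
    simp only [pvPasses]
    exact (ih _).trans (pvOnePass_perm l)

lemma pvOnePass_length (l : List Int) : (pvOnePass l).1.length = l.length :=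
  (pvOnePass_perm l).length_eq

lemma pvRangeM1_cast (N : Nat) :
    PySem.List.pyRange 0 ((N : Int) - 1) 1 = pvIdx (N - 1) := by
  cases N with
  | zero => rw [PySem.List.pyRange_one_eq_nil (by omega)]; rfl
  | succ k =>
    rw [show ((k+1 : Nat) : Int) - 1 = (k : Int) by push_cast; ring, pvRange_cast]
    rfl

lemma pvOuter (N : Nat) : ∀ (rng : List Int) (l : List Int) (s : Int), l.length = N →
    List.foldl (fun st (_ : Int) =>
        List.foldl pvInnerStep st (pvIdx (N - 1))) (l, s) rng =
      ((pvPasses rng.length l).1, s + ((pvPasses rng.length l).2 : Int)) := by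
  intro rng
  induction rng with
  | nil => intro l s _; simp [pvPasses]
  | cons j rng ih =>
    intro l s hl
    subst hl
    simp only [List.foldl_cons]
    rw [pvPass_eq l s, ih _ _ (pvOnePass_length l)]
    simp only [pvPasses, List.length_cons]
    refine Prod.ext rfl ?_
    push_cast
    ring
lemma pvIdx_length (k : Nat) : (pvIdx k).length = k := by simp [pvIdx]

lemma pvCountSwaps_eq_passes (a : List Int) :
    countSwaps a = ((pvPasses a.length a).2 : Int) := by
  unfold countSwaps
  simp only [PySem.List.len_eq, pvRange_cast, pvRangeM1_cast]
  rw [pvOuter a.length (pvIdx a.length) a 0 rfl]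
  simp [pvIdx_length]
def pvInv : List Int → Nat
  | [] => 0
  | x :: t => t.countP (fun y => decide (y < x)) + pvInv t

lemma pvInv_onePass (l : List Int) :
    pvInv l = (pvOnePass l).2 + pvInv (pvOnePass l).1 := by
  induction l using pvOnePass.induct with
  | case1 => simp [pvOnePass, pvInv]
  | case2 x => simp [pvOnePass, pvInv]
  | case3 x y t hlt ih =>
    simp only [pvOnePass, if_pos hlt]
    have hc : ((pvOnePass (x :: t)).1).countP (fun z => decide (z < y)) =
        (x :: t).countP (fun z => decide (z < y)) :=
      (pvOnePass_perm (x :: t)).countP_eq _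
    simp only [pvInv, List.countP_cons] at ih ⊢
    rw [hc]
    simp only [List.countP_cons]
    have h1 : (decide (y < x) : Bool) = true := by simp [hlt]
    have h2 : (decide (x < y) : Bool) = false := by simp; omega
    rw [h1, h2]
    simp only [Bool.false_eq_true, if_true, if_false]
    omega
  | case4 x y t hge ih =>
    simp only [pvOnePass, if_neg hge]
    have hc : ((pvOnePass (y :: t)).1).countP (fun z => decide (z < x)) =
        (y :: t).countP (fun z => decide (z < x)) :=
      (pvOnePass_perm (y :: t)).countP_eq _
    simp only [pvInv, List.countP_cons] at ih ⊢
    rw [hc]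
    simp only [List.countP_cons]
    have h1 : (decide (y < x) : Bool) = false := by simp; omega
    rw [h1]
    simp only [Bool.false_eq_true, if_false]
    omega

lemma pvInv_passes (k : Nat) : ∀ (l : List Int),
    pvInv l = (pvPasses k l).2 + pvInv ((pvPasses k l).1) := by
  induction k with
  | zero => intro l; simp [pvPasses]
  | succ k ih =>
    intro l
    simp only [pvPasses]
    rw [pvInv_onePass l, ih (pvOnePass l).1]
    omega

lemma pvOnePass_appendMax (u : List Int) (m : Int) : (∀ x ∈ u, x ≤ m) →
    pvOnePass (u ++ [m]) = ((pvOnePass u).1 ++ [m], (pvOnePass u).2) := by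
  induction u using pvOnePass.induct with
  | case1 => intro _; simp [pvOnePass]
  | case2 x =>
    intro h
    have : ¬ m < x := by have := h x (by simp); omega
    simp [pvOnePass, this]
  | case3 x y t hlt ih =>
    intro h
    simp only [List.cons_append, pvOnePass, if_pos hlt]
    have hx : x :: (t ++ [m]) = (x :: t) ++ [m] := (List.cons_append (a := x) (as := t) (bs := [m])).symm
    rw [hx, ih (fun z hz => h z (by simp at hz ⊢; tauto))]
  | case4 x y t hge ih =>
    intro h
    simp only [List.cons_append, pvOnePass, if_neg hge]
    have hy : y :: (t ++ [m]) = (y :: t) ++ [m] := (List.cons_append (a := y) (as := t) (bs := [m])).symm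
    rw [hy, ih (fun z hz => h z (by simp at hz ⊢; tauto))]

lemma pvOnePass_lastMax (l : List Int) : l ≠ [] →
    ∃ u m, (pvOnePass l).1 = u ++ [m] ∧ (∀ x ∈ u, x ≤ m) ∧ (∀ x ∈ l, x ≤ m) := by
  induction l using pvOnePass.induct with
  | case1 => intro h; exact absurd rfl h
  | case2 x =>
    intro _
    exact ⟨[], x, by simp [pvOnePass]⟩
  | case3 x y t hlt ih =>
    intro _
    obtain ⟨u, m, h1, h2, h3⟩ := ih (by simp)
    refine ⟨y :: u, m, ?_, ?_, ?_⟩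
    · simp only [pvOnePass, if_pos hlt, h1]; rfl
    · intro w hw
      rcases List.mem_cons.mp hw with rfl | hw
      · have := h3 x (by simp); omega
      · exact h2 w hw
    · intro w hw
      simp only [List.mem_cons] at hw
      rcases hw with rfl | rfl | hw
      · exact h3 w (by simp)
      · have := h3 x (by simp); omega
      · exact h3 w (by simp [hw])
  | case4 x y t hge ih =>
    intro _
    obtain ⟨u, m, h1, h2, h3⟩ := ih (by simp)
    refine ⟨x :: u, m, ?_, ?_, ?_⟩
    · simp only [pvOnePass, if_neg hge, h1]; rfl
    · intro w hw
      rcases List.mem_cons.mp hw with rfl | hw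
      · have := h3 y (by simp); omega
      · exact h2 w hw
    · intro w hw
      simp only [List.mem_cons] at hw
      rcases hw with rfl | rfl | hw
      · have := h3 y (by simp); omega
      · exact h3 w (by simp)
      · exact h3 w (by simp [hw])

lemma pvPasses_appendMax (k : Nat) : ∀ (u : List Int) (m : Int), (∀ x ∈ u, x ≤ m) →
    pvPasses k (u ++ [m]) = ((pvPasses k u).1 ++ [m], (pvPasses k u).2) := by
  induction k with
  | zero => intro u m _; simp [pvPasses]
  | succ k ih =>
    intro u m h
    simp only [pvPasses]
    rw [pvOnePass_appendMax u m h,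
        ih (pvOnePass u).1 m (fun z hz => h z ((pvOnePass_perm u).mem_iff.mp hz))]

lemma pvPasses_sorted (k : Nat) : ∀ (l : List Int), l.length ≤ k →
    ((pvPasses k l).1).Pairwise (· ≤ ·) := by
  induction k with
  | zero =>
    intro l hl
    have : l = [] := List.length_eq_zero_iff.mp (by omega)
    subst this
    simp [pvPasses]
  | succ k ih =>
    intro l hl
    rcases eq_or_ne l [] with rfl | hne
    · have h0 : (pvPasses (k+1) ([] : List Int)).1 = [] :=
        List.Perm.eq_nil (pvPasses_perm (k+1) [])
      rw [h0]
      exact List.Pairwise.nil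
    · obtain ⟨u, m, h1, h2, _⟩ := pvOnePass_lastMax l hne
      simp only [pvPasses]
      rw [h1, pvPasses_appendMax k u m h2]
      have hlen : u.length + 1 = l.length := by
        have := pvOnePass_length l
        rw [h1] at this
        simpa using this
      have hs := ih u (by omega)
      rw [List.pairwise_append]
      refine ⟨hs, by simp, ?_⟩
      intro z hz w hw
      simp only [List.mem_singleton] at hw
      subst hw
      exact h2 z ((pvPasses_perm k u).mem_iff.mp hz)

lemma pvInv_of_pairwise (l : List Int) : l.Pairwise (· ≤ ·) → pvInv l = 0 := by
  induction l with
  | nil => intro _; rfl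
  | cons x t ih =>
    intro h
    rw [List.pairwise_cons] at h
    simp only [pvInv, ih h.2, Nat.add_zero]
    rw [List.countP_eq_zero]
    intro z hz
    have := h.1 z hz
    simp; omega

lemma pvA_eq_inv (a : List Int) : countSwaps a = (pvInv a : Int) := by
  rw [pvCountSwaps_eq_passes, pvInv_passes a.length a,
      pvInv_of_pairwise _ (pvPasses_sorted a.length a le_rfl)]
  simp
def pvCross (u v : List Int) : Nat :=
  (u.map (fun x => v.countP (fun y => decide (y < x)))).sum

lemma pvMergeLoop_perm (l r : List Int) : (pvMergeLoop l r).1.Perm (l ++ r) := by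
  induction l, r using pvMergeLoop.induct with
  | case1 r => simp [pvMergeLoop]
  | case2 l h => simp [pvMergeLoop]
  | case3 x l y r hle ih =>
    simp only [pvMergeLoop, if_pos hle]
    exact ih.cons x
  | case4 x l y r hgt ih =>
    simp only [pvMergeLoop, if_neg hgt]
    refine (ih.cons y).trans ?_
    exact (List.perm_middle (a := y) (l₁ := x :: l) (l₂ := r)).symm

lemma pvMergeLoop_sorted (l r : List Int) (hl : l.Pairwise (· ≤ ·)) (hr : r.Pairwise (· ≤ ·)) :
    (pvMergeLoop l r).1.Pairwise (· ≤ ·) := by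
  induction l, r using pvMergeLoop.induct with
  | case1 r => simpa [pvMergeLoop] using hr
  | case2 l h => simpa [pvMergeLoop] using hl
  | case3 x l y r hle ih =>
    simp only [pvMergeLoop, if_pos hle]
    rw [List.pairwise_cons] at hl ⊢
    refine ⟨?_, ih hl.2 hr⟩
    intro z hz
    have hz' : z ∈ l ++ (y :: r) := (pvMergeLoop_perm l (y :: r)).mem_iff.mp hz
    rcases List.mem_append.mp hz' with h | h
    · exact hl.1 z h
    · rcases List.mem_cons.mp h with rfl | h
      · exact hle
      · exact le_trans hle ((List.pairwise_cons.mp hr).1 z h)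
  | case4 x l y r hgt ih =>
    simp only [pvMergeLoop, if_neg hgt]
    rw [List.pairwise_cons] at hr ⊢
    refine ⟨?_, ih hl hr.2⟩
    intro z hz
    have hz' : z ∈ (x :: l) ++ r := (pvMergeLoop_perm (x :: l) r).mem_iff.mp hz
    rcases List.mem_append.mp hz' with h | h
    · rcases List.mem_cons.mp h with rfl | h
      · omega
      · have := (List.pairwise_cons.mp hl).1 z h
        omega
    · exact hr.1 z h

lemma pvMergeLoop_count (l r : List Int) (hl : l.Pairwise (· ≤ ·)) (hr : r.Pairwise (· ≤ ·)) :
    (pvMergeLoop l r).2 = (pvCross l r : Int) := by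
  induction l, r using pvMergeLoop.induct with
  | case1 r => simp [pvMergeLoop, pvCross]
  | case2 l h =>
    cases l with
    | nil => simp [pvMergeLoop, pvCross]
    | cons a l => simp [pvMergeLoop, pvCross]
  | case3 x l y r hle ih =>
    simp only [pvMergeLoop, if_pos hle]
    rw [ih (List.pairwise_cons.mp hl).2 hr]
    have hzero : (y :: r).countP (fun z => decide (z < x)) = 0 := by
      rw [List.countP_eq_zero]
      intro z hz
      rcases List.mem_cons.mp hz with rfl | hz
      · simp; omega
      · have := (List.pairwise_cons.mp hr).1 z hz
        simp; omega
    simp only [pvCross, List.map_cons, List.sum_cons, hzero]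
    simp
  | case4 x l y r hgt ih =>
    simp only [pvMergeLoop, if_neg hgt]
    rw [ih hl (List.pairwise_cons.mp hr).2]
    -- every element of x :: l is greater than y
    have hall : ∀ z ∈ x :: l, y < z := by
      intro z hz
      rcases List.mem_cons.mp hz with rfl | hz
      · omega
      · have := (List.pairwise_cons.mp hl).1 z hz
        omega
    have hsplit : pvCross (x :: l) (y :: r) = (x :: l).length + pvCross (x :: l) r := by
      have hone : ∀ z ∈ x :: l,
          ((y :: r).countP (fun w => decide (w < z))) = r.countP (fun w => decide (w < z)) + 1 := by
        intro z hz
        have := hall z hz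
        simp only [List.countP_cons]
        simp [this]
      simp only [pvCross]
      rw [List.map_congr_left hone, List.sum_map_add]
      simp [Nat.add_comm]
    rw [hsplit]
    push_cast
    ring

lemma pvInv_append (u v : List Int) :
    pvInv (u ++ v) = pvInv u + pvInv v + pvCross u v := by
  induction u with
  | nil => simp [pvInv, pvCross]
  | cons x u ih =>
    simp only [List.cons_append, pvInv, List.countP_append, pvCross, List.map_cons,
      List.sum_cons] at ih ⊢
    omega

lemma pvCross_perm_right (l : List Int) {r r' : List Int} (h : r.Perm r') :
    pvCross l r = pvCross l r' := by
  unfold pvCross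
  rw [List.map_congr_left (fun x _ => h.countP_eq (fun y => decide (y < x)))]

lemma pvCross_perm_left {l l' : List Int} (r : List Int) (h : l.Perm l') :
    pvCross l r = pvCross l' r := by
  unfold pvCross
  exact (h.map _).sum_eq

lemma pvMsort_main (xs : List Int) :
    (pvMsort xs).1.Perm xs ∧ (pvMsort xs).1.Pairwise (· ≤ ·) ∧
      (pvMsort xs).2 = (pvInv xs : Int) := by
  induction xs using pvMsort.induct with
  | case1 xs h =>
    rw [pvMsort, if_pos h]
    refine ⟨List.Perm.refl xs, ?_, ?_⟩
    · match xs, h with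
      | [], _ => exact List.Pairwise.nil
      | [x], _ => simp
    · match xs, h with
      | [], _ => simp [pvInv]
      | [x], _ => simp [pvInv]
  | case2 xs h ih1 ih2 =>
    rw [pvMsort, if_neg h]
    simp only
    obtain ⟨hp1, hs1, hc1⟩ := ih1
    obtain ⟨hp2, hs2, hc2⟩ := ih2
    have hperm : (pvMergeLoop (pvMsort (xs.take (xs.length / 2))).1
        (pvMsort (xs.drop (xs.length / 2))).1).1.Perm xs := by
      refine (pvMergeLoop_perm _ _).trans ?_
      refine ((hp1.append hp2).trans ?_)
      rw [List.take_append_drop]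
    refine ⟨hperm, pvMergeLoop_sorted _ _ hs1 hs2, ?_⟩
    rw [pvMergeLoop_count _ _ hs1 hs2, hc1, hc2]
    have hcross : pvCross (pvMsort (xs.take (xs.length / 2))).1
        (pvMsort (xs.drop (xs.length / 2))).1 =
        pvCross (xs.take (xs.length / 2)) (xs.drop (xs.length / 2)) := by
      rw [pvCross_perm_left _ hp1, pvCross_perm_right _ hp2]
    have hsplit := pvInv_append (xs.take (xs.length / 2)) (xs.drop (xs.length / 2))
    rw [List.take_append_drop] at hsplit
    rw [hcross]
    push_cast [hsplit]
    ring

-- ===== VERDICT (by name: the statement is the Claim_ definition above) =====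
theorem countSwaps_spec : Claim_equal_countSwaps := by
  intro a _
  unfold Spec_countSwaps countSwaps_alt
  rw [pvA_eq_inv, (pvMsort_main a).2.2]
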